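-- pv_equiv track=rewrite | github.com/UII-AI/MedGRPO-Code | evaluation/eval_next_action.py | detect_dataset_from_question
-- ===== SOURCE A (Python) =====
-- def detect_dataset_from_question(question):
--     """Detect dataset from question text patterns."""
--     question_lower = question.lower()
--
--     if "avos" in question_lower:
--         return "AVOS"
--     elif "copesd" in question_lower:
--         return "CoPESD"
--     elif "cholect50" in question_lower or "cholec" in question_lower:
--         return "CholecT50"
--     elif "nurvid" in question_lower or "nursing" in question_lower:
--         return "NurViD"
--
--     # Check for dataset-specific action patterns
--     if any(action in question_lower for action in ["cutting", "tying", "suturing"]):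
--         return "AVOS"
--     elif "forceps" in question_lower and "knife" in question_lower:
--         return "CoPESD"
--
--     return "Unknown"
-- ===== SOURCE B (Python) =====
-- # B: staged multi-pattern scan — one pass over text positions collects the set of all
-- # keyword occurrences, then the label is decided from that set (priority list + set algebra).
-- _KEYWORDS = ("avos", "copesd", "cholect50", "cholec", "nurvid", "nursing",
--              "cutting", "tying", "suturing", "forceps", "knife")
-- _PRIMARY = (("avos", "AVOS"), ("copesd", "CoPESD"), ("cholect50", "CholecT50"),
--             ("cholec", "CholecT50"), ("nurvid", "NurViD"), ("nursing", "NurViD"))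
--
-- def detect_dataset_from_question(question):
--     q = question.lower()
--     found = set()
--     for i in range(len(q)):
--         for kw in _KEYWORDS:
--             if q.startswith(kw, i):
--                 found.add(kw)
--     for kw, label in _PRIMARY:
--         if kw in found:
--             return label
--     if found & {"cutting", "tying", "suturing"}:
--         return "AVOS"
--     if {"forceps", "knife"} <= found:
--         return "CoPESD"
--     return "Unknown"
-- ===== Notes on version B (the rewrite author's own statement) =====
-- stated objective: alternative
-- what changed: Instead of A's per-keyword substring tests in an if/elif chain, B makes one staged scan: a single pass over the text positions collects the set of all keyword occurrences at once, and the label is then decided from that found-set via a priority list and set algebra (intersection / subset).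
import Mathlib
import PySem

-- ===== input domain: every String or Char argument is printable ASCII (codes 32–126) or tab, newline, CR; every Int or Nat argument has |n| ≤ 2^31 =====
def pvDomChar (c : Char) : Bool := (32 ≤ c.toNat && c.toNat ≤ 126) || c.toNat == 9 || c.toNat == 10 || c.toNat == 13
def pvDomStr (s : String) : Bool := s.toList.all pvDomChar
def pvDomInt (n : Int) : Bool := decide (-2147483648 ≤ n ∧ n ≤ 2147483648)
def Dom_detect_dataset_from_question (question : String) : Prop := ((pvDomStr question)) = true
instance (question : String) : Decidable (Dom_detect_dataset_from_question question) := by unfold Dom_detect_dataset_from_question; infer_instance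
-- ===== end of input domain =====

-- B replaces A's if/elif chain of substring tests by a staged multi-pattern scan: one pass
-- over the positions collects the set of keyword occurrences, then the label is decided
-- from that set (objective: alternative).

-- ===== PORT A =====
def detect_dataset_from_question (question : String) : String :=
  let question_lower := PySem.Str.lower question
  if PySem.Str.isIn "avos" question_lower then "AVOS"
  else if PySem.Str.isIn "copesd" question_lower then "CoPESD"
  else if PySem.Str.isIn "cholect50" question_lower || PySem.Str.isIn "cholec" question_lower then "CholecT50"
  else if PySem.Str.isIn "nurvid" question_lower || PySem.Str.isIn "nursing" question_lower then "NurViD"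
  else if (["cutting", "tying", "suturing"].any fun action => PySem.Str.isIn action question_lower) then "AVOS"
  else if PySem.Str.isIn "forceps" question_lower && PySem.Str.isIn "knife" question_lower then "CoPESD"
  else "Unknown"

-- ===== PORT B =====
def pvKeywords : List String :=
  ["avos", "copesd", "cholect50", "cholec", "nurvid", "nursing",
   "cutting", "tying", "suturing", "forceps", "knife"]

def pvPrimary : List (String × String) :=
  [("avos", "AVOS"), ("copesd", "CoPESD"), ("cholect50", "CholecT50"),
   ("cholec", "CholecT50"), ("nurvid", "NurViD"), ("nursing", "NurViD")]

-- the scan loop of Source B: for i in range(len(q)): for kw in _KEYWORDS: if q.startswith(kw, i): found.add(kw)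
-- (q.startswith(kw, i) with 0 ≤ i < len(q) is exactly: kw is a prefix of q[i:])
def pvFound (ql : List Char) : PySem.Set String :=
  (PySem.List.pyRange 0 (PySem.Chars.len ql) 1).foldl
    (fun acc i => pvKeywords.foldl
      (fun acc kw => if PySem.Chars.startswith (ql.drop i.toNat) kw.toList then PySem.Set.add acc kw else acc) acc)
    PySem.Set.empty

def detect_dataset_from_question_alt (question : String) : String :=
  let q := PySem.Str.lower question
  let found := pvFound q.toList
  match pvPrimary.find? (fun r => decide (r.1 ∈ found)) with
  | some r => r.2
  | none =>
    if PySem.Set.inter found (PySem.Set.ofList ["cutting", "tying", "suturing"]) ≠ [] then "AVOS"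
    else if PySem.Set.issubset (PySem.Set.ofList ["forceps", "knife"]) found then "CoPESD"
    else "Unknown"

-- ===== PRECONDITION & SPEC =====
def Spec_detect_dataset_from_question (question : String) (out : String) : Prop := out = detect_dataset_from_question_alt question
instance (question : String) (out : String) : Decidable (Spec_detect_dataset_from_question question out) := by unfold Spec_detect_dataset_from_question; infer_instance

-- ===== CLAIM =====
def Claim_equal_detect_dataset_from_question : Prop := ∀ (question : String), Dom_detect_dataset_from_question question → Spec_detect_dataset_from_question question (detect_dataset_from_question question)

-- ===== LEMMAS AND PROOFS =====

lemma mem_innerFold (p : String → Bool) (kws : List String) (acc : PySem.Set String) (kw : String) :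
    kw ∈ kws.foldl (fun a k => if p k then PySem.Set.add a k else a) acc ↔
      kw ∈ acc ∨ (kw ∈ kws ∧ p kw = true) := by
  induction kws generalizing acc with
  | nil => simp
  | cons k t ih =>
    simp only [List.foldl_cons]
    by_cases hp : p k = true
    · rw [ih]
      simp only [hp, if_true, PySem.Set.mem_add, List.mem_cons]
      constructor
      · rintro ((h | rfl) | h)
        · exact Or.inl h
        · exact Or.inr ⟨Or.inl rfl, hp⟩
        · exact Or.inr ⟨Or.inr h.1, h.2⟩
      · rintro (h | ⟨(rfl | h), hpk⟩)
        · exact Or.inl (Or.inl h)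
        · exact Or.inl (Or.inr rfl)
        · exact Or.inr ⟨h, hpk⟩
    · rw [if_neg hp, ih]
      simp only [List.mem_cons]
      constructor
      · rintro (h | h)
        · exact Or.inl h
        · exact Or.inr ⟨Or.inr h.1, h.2⟩
      · rintro (h | ⟨(rfl | h), hpk⟩)
        · exact Or.inl h
        · exact absurd hpk hp
        · exact Or.inr ⟨h, hpk⟩

lemma mem_pvFound (ql : List Char) (kw : String) (hne : kw.toList ≠ []) :
    kw ∈ pvFound ql ↔ (kw ∈ pvKeywords ∧ PySem.Chars.isIn kw.toList ql = true) := by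
  unfold pvFound
  have houter : ∀ (is : List Int) (acc : PySem.Set String),
      kw ∈ is.foldl (fun acc i => pvKeywords.foldl
        (fun acc k => if PySem.Chars.startswith (ql.drop i.toNat) k.toList then PySem.Set.add acc k else acc) acc) acc ↔
      kw ∈ acc ∨ (kw ∈ pvKeywords ∧ ∃ i ∈ is, PySem.Chars.startswith (ql.drop i.toNat) kw.toList = true) := by
    intro is
    induction is with
    | nil => intro acc; simp
    | cons i t ih =>
      intro acc
      simp only [List.foldl_cons, ih, mem_innerFold, List.mem_cons]
      constructor
      · rintro (⟨h | h⟩ | ⟨hk, j, hj, hs⟩)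
        · exact Or.inl h
        · exact Or.inr ⟨h.1, i, Or.inl rfl, h.2⟩
        · exact Or.inr ⟨hk, j, Or.inr hj, hs⟩
      · rintro (h | ⟨hk, j, (rfl | hj), hs⟩)
        · exact Or.inl (Or.inl h)
        · exact Or.inl (Or.inr ⟨hk, hs⟩)
        · exact Or.inr ⟨hk, j, hj, hs⟩
  rw [houter]
  simp only [PySem.Set.empty, List.not_mem_nil, false_or]
  constructor
  · rintro ⟨hk, i, _, hs⟩
    refine ⟨hk, ?_⟩
    rw [← PySem.Chars.exists_prefix_drop_iff_isIn]
    exact ⟨i.toNat, (PySem.Chars.startswith_iff _ _).1 hs⟩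
  · rintro ⟨hk, hin⟩
    rw [← PySem.Chars.exists_prefix_drop_iff_isIn] at hin
    obtain ⟨j, hj⟩ := hin
    have hjlt : j < ql.length := by
      rcases Nat.lt_or_ge j ql.length with hlt | hge
      · exact hlt
      · rw [List.drop_eq_nil_of_le hge] at hj
        exact absurd (List.prefix_nil.mp hj) hne
    refine ⟨hk, (j : Int), ?_, ?_⟩
    · rw [PySem.List.mem_pyRange_one, PySem.Chars.len_eq]
      exact ⟨Int.natCast_nonneg j, by exact_mod_cast hjlt⟩
    · rw [PySem.Chars.startswith_iff]
      simpa using hj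

-- decide (kw ∈ pvFound ql) computed from the substring flag, for a literal keyword of the table
lemma decide_mem_pvFound (ql : List Char) (kw : String) (hne : kw.toList ≠ []) (hk : kw ∈ pvKeywords) :
    decide (kw ∈ pvFound ql) = PySem.Chars.isIn kw.toList ql := by
  obtain h | h := Bool.dichotomy (PySem.Chars.isIn kw.toList ql)
  · simp [h, (mem_pvFound ql kw hne), hk]
  · simp [h, (mem_pvFound ql kw hne), hk]

-- inter-nonemptiness and subset conditions of B, phrased through the found-set memberships
lemma inter_actions_ne_nil_iff (found : PySem.Set String) :
    (PySem.Set.inter found (PySem.Set.ofList ["cutting", "tying", "suturing"]) ≠ []) ↔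
      ("cutting" ∈ found ∨ "tying" ∈ found ∨ "suturing" ∈ found) := by
  rw [Ne, List.eq_nil_iff_forall_not_mem]
  constructor
  · intro h
    by_contra hc
    rw [not_or, not_or] at hc
    apply h
    intro x hx
    rw [PySem.Set.mem_inter, PySem.Set.mem_ofList] at hx
    obtain ⟨hxf, hxl⟩ := hx
    simp only [List.mem_cons, List.not_mem_nil, or_false] at hxl
    rcases hxl with rfl | rfl | rfl
    · exact hc.1 hxf
    · exact hc.2.1 hxf
    · exact hc.2.2 hxf
  · rintro (h | h | h) hall
    · exact hall _ (by rw [PySem.Set.mem_inter, PySem.Set.mem_ofList]; exact ⟨h, by decide⟩)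
    · exact hall _ (by rw [PySem.Set.mem_inter, PySem.Set.mem_ofList]; exact ⟨h, by decide⟩)
    · exact hall _ (by rw [PySem.Set.mem_inter, PySem.Set.mem_ofList]; exact ⟨h, by decide⟩)

lemma issubset_fk_iff (found : PySem.Set String) :
    PySem.Set.issubset (PySem.Set.ofList ["forceps", "knife"]) found =
      (decide ("forceps" ∈ found) && decide ("knife" ∈ found)) := by
  by_cases hf : "forceps" ∈ found
  · by_cases hk : "knife" ∈ found
    · simp only [hf, hk, decide_true, Bool.and_self]
      rw [PySem.Set.issubset_iff]
      intro x hx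
      rw [PySem.Set.mem_ofList] at hx
      simp only [List.mem_cons, List.not_mem_nil, or_false] at hx
      rcases hx with rfl | rfl
      · exact hf
      · exact hk
    · simp only [hf, hk, decide_true, decide_false, Bool.and_false]
      rw [← Bool.not_eq_true, PySem.Set.issubset_iff]
      intro hall
      exact hk (hall _ (by rw [PySem.Set.mem_ofList]; decide))
  · simp only [hf, decide_false, Bool.false_and]
    rw [← Bool.not_eq_true, PySem.Set.issubset_iff]
    intro hall
    exact hf (hall _ (by rw [PySem.Set.mem_ofList]; decide))

-- ===== VERDICT =====
set_option maxHeartbeats 2000000 in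
theorem detect_dataset_from_question_spec : Claim_equal_detect_dataset_from_question := by
  intro question _
  unfold Spec_detect_dataset_from_question detect_dataset_from_question detect_dataset_from_question_alt
  set q := PySem.Str.lower question with hq
  have hd : ∀ kw ∈ pvKeywords, decide (kw ∈ pvFound q.toList) = PySem.Chars.isIn kw.toList q.toList := by
    intro kw hk
    exact decide_mem_pvFound _ _ (by fin_cases hk <;> decide) hk
  have e1 := hd "avos" (by decide)
  have e2 := hd "copesd" (by decide)
  have e3 := hd "cholect50" (by decide)
  have e4 := hd "cholec" (by decide)
  have e5 := hd "nurvid" (by decide)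
  have e6 := hd "nursing" (by decide)
  have e10 := hd "forceps" (by decide)
  have e11 := hd "knife" (by decide)
  simp only [PySem.Str.isIn_eq, pvPrimary, List.find?_cons, List.find?_nil,
    inter_actions_ne_nil_iff, issubset_fk_iff,
    e1, e2, e3, e4, e5, e6, e10, e11]
  have m7 : ("cutting" ∈ pvFound q.toList) ↔ PySem.Chars.isIn "cutting".toList q.toList = true :=
    ⟨fun h => ((mem_pvFound _ _ (by decide)).1 h).2, fun h => (mem_pvFound _ _ (by decide)).2 ⟨by decide, h⟩⟩
  have m8 : ("tying" ∈ pvFound q.toList) ↔ PySem.Chars.isIn "tying".toList q.toList = true :=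
    ⟨fun h => ((mem_pvFound _ _ (by decide)).1 h).2, fun h => (mem_pvFound _ _ (by decide)).2 ⟨by decide, h⟩⟩
  have m9 : ("suturing" ∈ pvFound q.toList) ↔ PySem.Chars.isIn "suturing".toList q.toList = true :=
    ⟨fun h => ((mem_pvFound _ _ (by decide)).1 h).2, fun h => (mem_pvFound _ _ (by decide)).2 ⟨by decide, h⟩⟩
  simp only [m7, m8, m9]
  obtain b1 | b1 := Bool.dichotomy (PySem.Chars.isIn "avos".toList q.toList) <;> simp only [b1] <;> try rfl
  obtain b2 | b2 := Bool.dichotomy (PySem.Chars.isIn "copesd".toList q.toList) <;> simp only [b2] <;> try rfl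
  obtain b3 | b3 := Bool.dichotomy (PySem.Chars.isIn "cholect50".toList q.toList) <;> simp only [b3] <;> try rfl
  obtain b4 | b4 := Bool.dichotomy (PySem.Chars.isIn "cholec".toList q.toList) <;> simp only [b4] <;> try rfl
  obtain b5 | b5 := Bool.dichotomy (PySem.Chars.isIn "nurvid".toList q.toList) <;> simp only [b5] <;> try rfl
  obtain b6 | b6 := Bool.dichotomy (PySem.Chars.isIn "nursing".toList q.toList) <;> simp only [b6] <;> try rfl
  obtain b7 | b7 := Bool.dichotomy (PySem.Chars.isIn "cutting".toList q.toList) <;> simp only [List.any_cons, List.any_nil, b7] <;> try rfl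
  obtain b8 | b8 := Bool.dichotomy (PySem.Chars.isIn "tying".toList q.toList) <;> simp only [b8] <;> try rfl
  obtain b9 | b9 := Bool.dichotomy (PySem.Chars.isIn "suturing".toList q.toList) <;> simp only [b9] <;> rfl
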